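-- pv_equiv track=rewrite | github.com/squishyjs/daily-solve | Python/codeSale.py | solve
-- ===== SOURCE A (Python) =====
-- def solve(length: int, days: list[int]) -> int: # solve the code
--
--     count: int = 0
--     max_count: int = 0
--     for sale in days:
--
--         current_sale: int = sale
--         double_sale: int = current_sale * 2
--
--         if (double_sale + count) > max_count:
--             max_count = double_sale + count # update maximum
--
--         count += sale # record the current sale
--
--     return max_count # return the max count if found in the days
-- ===== SOURCE B (Python) =====
-- def solve(length: int, days: list[int]) -> int:
--     # Backward suffix recurrence (no prefix sums): best(i) = max over the
--     # suffix days[i:] of 0 and 2*days[j] + sum(days[i:j]).  The answer for the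
--     # whole list equals A's max(0, 2*days[j] + sum(days[:j])).
--     best = 0
--     for d in reversed(days):
--         best = max(0, 2 * d, d + best)
--     return best
-- ===== Notes on version B (the rewrite author's own statement) =====
-- stated objective: alternative
-- what changed: Replaced A's forward fused running-prefix-sum-and-max loop by a backward Kadane-style suffix recurrence best = max(0, 2*d, d + best) that never maintains a prefix sum at all.
import Mathlib
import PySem

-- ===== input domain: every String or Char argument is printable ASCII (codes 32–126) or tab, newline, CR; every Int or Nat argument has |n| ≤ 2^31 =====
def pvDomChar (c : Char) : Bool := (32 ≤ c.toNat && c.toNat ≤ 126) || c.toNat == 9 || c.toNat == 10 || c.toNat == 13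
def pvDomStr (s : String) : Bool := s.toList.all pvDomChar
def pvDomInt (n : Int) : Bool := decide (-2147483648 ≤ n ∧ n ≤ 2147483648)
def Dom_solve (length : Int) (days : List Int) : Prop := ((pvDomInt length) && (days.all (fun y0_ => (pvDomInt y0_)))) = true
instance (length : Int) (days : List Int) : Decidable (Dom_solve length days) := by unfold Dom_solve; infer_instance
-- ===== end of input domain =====

-- B replaces A's forward fused running-prefix-sum+max loop by a backward suffix
-- recurrence best = max(0, 2*d, d + best) with no prefix sum (objective: alternative).

-- ===== PORT A =====
-- A's loop: state (count, max_count); per element update max_count then add sale to count.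
def solveLoopA : List Int → Int × Int → Int
  | [], (_, m) => m
  | sale :: rest, (count, m) =>
      solveLoopA rest (count + sale, if 2 * sale + count > m then 2 * sale + count else m)

def solve (length : Int) (days : List Int) : Int :=
  solveLoopA days (0, 0)

-- ===== PORT B =====
-- Source B's loop over reversed(days) with accumulator best: a right fold.
def solve_alt (length : Int) (days : List Int) : Int :=
  days.foldr (fun d best => max 0 (max (2 * d) (d + best))) 0

-- ===== PRECONDITION & SPEC =====
def Spec_solve (length : Int) (days : List Int) (out : Int) : Prop := out = solve_alt length days
instance (length : Int) (days : List Int) (out : Int) : Decidable (Spec_solve length days out) := by unfold Spec_solve; infer_instance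

-- ===== CLAIM (what is proved, stated in full; the proofs are below) =====
def Claim_equal_solve : Prop := ∀ (length : Int) (days : List Int), Dom_solve length days → Spec_solve length days (solve length days)

-- ===== LEMMAS AND PROOFS =====

-- Loop invariant of A (count ≤ max_count is preserved): A's tail computation equals
-- max_count maxed with count shifted by B's suffix value.
theorem solveLoopA_eq (days : List Int) : ∀ (c m : Int), c ≤ m →
    solveLoopA days (c, m) =
      max m (c + days.foldr (fun d best => max 0 (max (2 * d) (d + best))) 0) := by
  induction days with
  | nil =>
      intro c m h
      simp only [solveLoopA, List.foldr_nil]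
      omega
  | cons d rest ih =>
      intro c m h
      simp only [solveLoopA, List.foldr_cons]
      rw [ih (c + d) (if 2 * d + c > m then 2 * d + c else m) (by split <;> omega)]
      split <;> omega

theorem foldrB_nonneg (days : List Int) :
    0 ≤ days.foldr (fun d best => max 0 (max (2 * d) (d + best))) 0 := by
  induction days with
  | nil => simp
  | cons d rest ih => simp only [List.foldr_cons]; omega

-- ===== VERDICT (by name: the statement is the Claim_ definition above) =====
theorem solve_spec : Claim_equal_solve := by
  intro length days _
  unfold Spec_solve solve solve_alt
  rw [solveLoopA_eq days 0 0 le_rfl]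
  have := foldrB_nonneg days
  omega
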